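-- pv_equiv track=rewrite | github.com/BearHunter49/Algorithm | Greedy/무지의먹방라이브_re.py | solution
-- ===== SOURCE A (Python) =====
-- def solution(food_times, k):
--     answer = 0
--
--     # 시간 내 다 먹을 수 있는 케이스
--     total = sum(food_times)
--     if total <= k:
--         return -1
--
--     # 알고리즘
--     now_min = 0  # 초기값 0
--     while True:
--         next_min = int(1e9)
--         next_not_zero = 0
--
--         for i in range(len(food_times)):
--             # 최소값 빼주기
--             if food_times[i] != 0:
--                 food_times[i] -= now_min
--
--             # 시간 빼고 난 후
--             if food_times[i] != 0:
--                 next_not_zero += 1  # 0이 아닌 개수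
--
--                 if next_min > food_times[i]:  # 최소값 찾기
--                     next_min = food_times[i]
--
--         # 싸이클 끝
--         if k < next_not_zero:
--             break
--
--         # 다음 k 값 연산
--         t = next_min * next_not_zero  # 다음에 빼질 k 값
--
--         if k < t:  # 다음에 빼질 값보다 k가 작으면
--             now_min = k // next_not_zero
--             k -= now_min * next_not_zero
--         else:
--             now_min = next_min
--             k -= t
--
--     for i in range(len(food_times)):
--         if food_times[i] != 0:
--             if k == 0:
--                 answer = i
--                 break
--             else:
--                 k -= 1
--
--     return answer + 1
-- ===== SOURCE B (Python) =====
-- def solution(food_times, k):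
--     total = sum(food_times)
--     if total <= k:
--         return -1
--     s = sorted(food_times)
--     n = len(s)
--     j = 0
--     while j < n and s[j] <= 0:      # foods that need no time are never eaten
--         j += 1
--     level = 0                        # seconds already spent on every remaining food
--     while k >= n - j:                # k full rounds are impossible once k < remaining
--         step = s[j] - level
--         if k < step * (n - j):       # k runs out inside the current plateau
--             q = k // (n - j)
--             level += q
--             k -= q * (n - j)
--         else:                        # consume the whole plateau, drop finished foods
--             k -= step * (n - j)
--             level = s[j]
--             j += 1
--             while j < n and s[j] == level:
--                 j += 1
--     for i, v in enumerate(food_times):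
--         if v > level:
--             if k == 0:
--                 return i + 1
--             k -= 1
-- ===== Notes on version B (the rewrite author's own statement) =====
-- stated objective: alternative
-- what changed: A repeatedly rescans and mutates the whole list (one O(n) min-pass per eaten plateau); B sorts the times once and walks the sorted list with a single pointer, consuming each plateau by prefix arithmetic, then one pass over the original list picks the answer.
-- outside the precondition, e.g. on solution([1, 2], -1): A returns 1, B returns None; on solution([-2, 4, -5, 4, 5], 2): A returns 3, B returns 5
import Mathlib
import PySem

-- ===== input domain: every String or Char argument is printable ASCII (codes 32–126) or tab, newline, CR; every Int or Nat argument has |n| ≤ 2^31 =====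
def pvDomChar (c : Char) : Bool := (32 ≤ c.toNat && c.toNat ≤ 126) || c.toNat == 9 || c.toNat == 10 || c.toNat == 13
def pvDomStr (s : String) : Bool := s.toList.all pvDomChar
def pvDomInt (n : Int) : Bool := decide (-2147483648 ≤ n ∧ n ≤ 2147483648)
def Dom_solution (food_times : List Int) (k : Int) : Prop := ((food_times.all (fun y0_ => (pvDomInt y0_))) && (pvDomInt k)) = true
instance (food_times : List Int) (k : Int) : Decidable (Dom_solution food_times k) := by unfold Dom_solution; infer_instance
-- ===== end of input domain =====

-- B replaces A's repeated whole-list min-scan-and-subtract rounds by one sort followed by a single pointer walk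
-- over the sorted plateaus; equivalence is about the RETURN value only — Python A mutates food_times in place, B does not.

-- ===== PORT A =====
-- one round of A's inner for-loop: subtracts nowMin from nonzero entries while threading
-- (next_min, next_not_zero) left to right, exactly as the Python pass does
def passA (nowMin : Int) : List Int → Int → Int → List Int × Int × Int
  | [], nextMin, cnt => ([], nextMin, cnt)
  | v :: vs, nextMin, cnt =>
      let v1 := if v ≠ 0 then v - nowMin else v
      let nm := if v1 ≠ 0 ∧ v1 < nextMin then v1 else nextMin
      let c := if v1 ≠ 0 then cnt + 1 else cnt
      let r := passA nowMin vs nm c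
      (v1 :: r.1, r.2.1, r.2.2)

-- A's `while True` loop; fuel only makes the recursion total (each executed iteration consumes one
-- unit; on inputs satisfying Pre_ the loop provably breaks before the fuel runs out)
def loopA (fuel : Nat) (fs : List Int) (k nowMin : Int) : List Int × Int :=
  match fuel with
  | 0 => (fs, k)
  | fuel + 1 =>
      let r := passA nowMin fs 1000000000 0
      if k < r.2.2 then (r.1, k)
      else
        let t := r.2.1 * r.2.2
        if k < t then
          loopA fuel r.1 (k - PySem.Int.floordiv k r.2.2 * r.2.2) (PySem.Int.floordiv k r.2.2)
        else
          loopA fuel r.1 (k - t) r.2.1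

-- A's final for-loop with break: answer stays 0 when no nonzero entry is reached
def scanA : List Int → Int → Int → Int
  | [], _, _ => 0
  | v :: vs, k, i => if v ≠ 0 then (if k = 0 then i else scanA vs (k - 1) (i + 1)) else scanA vs k (i + 1)

def solution (food_times : List Int) (k : Int) : Int :=
  let total := food_times.sum
  if total ≤ k then -1
  else
    let r := loopA (k.toNat + 2) food_times k 0
    scanA r.1 r.2 0 + 1

-- ===== PORT B =====
-- `while j < n and s[j] <= 0: j += 1` (s[j] is in range under the guard, so getD is exact)
def skipLe (s : List Int) (j : Nat) : Nat :=
  if h : j < s.length then (if s.getD j 0 ≤ 0 then skipLe s (j + 1) else j) else j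
termination_by s.length - j
decreasing_by omega

-- `while j < n and s[j] == lv: j += 1`
def skipEq (s : List Int) (lv : Int) (j : Nat) : Nat :=
  if h : j < s.length then (if s.getD j 0 = lv then skipEq s lv (j + 1) else j) else j
termination_by s.length - j
decreasing_by omega

-- B's plateau walk over the sorted list; returns (level, k). Fuel only makes the loop total
-- (under Pre_ it provably breaks in time).
def loopB (fuel : Nat) (s : List Int) (j : Nat) (level k : Int) : Int × Int :=
  match fuel with
  | 0 => (level, k)
  | fuel + 1 =>
      if k ≥ (s.length : Int) - j then
        let step := s.getD j 0 - level
        if k < step * ((s.length : Int) - j) then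
          let q := PySem.Int.floordiv k ((s.length : Int) - j)
          loopB fuel s j (level + q) (k - q * ((s.length : Int) - j))
        else
          loopB fuel s (skipEq s (s.getD j 0) (j + 1)) (s.getD j 0) (k - step * ((s.length : Int) - j))
      else (level, k)

-- B's final for-loop over enumerate(food_times); 0 on fall-through (Python B falls off the end there,
-- which is unreachable under Pre_)
def scanB : List Int → Int → Int → Int → Int
  | [], _, _, _ => 0
  | v :: vs, level, k, i =>
      if level < v then (if k = 0 then i + 1 else scanB vs level (k - 1) (i + 1))
      else scanB vs level k (i + 1)

def solution_alt (food_times : List Int) (k : Int) : Int :=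
  let total := food_times.sum
  if total ≤ k then -1
  else
    let s := PySem.List.sorted food_times (fun x => x) false
    let j0 := skipLe s 0
    let r := loopB (s.length + 2) s j0 0 k
    scanB food_times r.1 r.2 0

-- ===== PRECONDITION & SPEC =====
-- Pre_ admits every input that finishes within the given time (both programs return -1 there) and otherwise
-- restricts to the problem's natural domain: nonnegative eating times and nonnegative k. Outside it A's
-- in-place min-subtraction treats negative times as edible food and A returns the constant 1 for every
-- negative k; B's natural loop returns no value there, so those inputs are excluded.
def Pre_solution (food_times : List Int) (k : Int) : Prop :=
  food_times.sum ≤ k ∨ (0 ≤ k ∧ ∀ v ∈ food_times, 0 ≤ v)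
instance (food_times : List Int) (k : Int) : Decidable (Pre_solution food_times k) := by
  unfold Pre_solution; infer_instance

def pvWitness_solution : List Int × Int := ([3, 1, 2], 5)

def Spec_solution (food_times : List Int) (k : Int) (out : Int) : Prop := out = solution_alt food_times k
instance (food_times : List Int) (k : Int) (out : Int) : Decidable (Spec_solution food_times k out) := by unfold Spec_solution; infer_instance

-- ===== CLAIM (what is proved, stated in full; the proofs are below) =====
def Claim_equal_solution : Prop := ∀ (food_times : List Int) (k : Int), Dom_solution food_times k → Pre_solution food_times k → Spec_solution food_times k (solution food_times k)

-- ===== LEMMAS AND PROOFS =====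

-- the food list after `L` seconds of eating have been charged to every (still unfinished) food
def subL (L : Int) (xs : List Int) : List Int := xs.map (fun v => if L < v then v - L else 0)

-- number of foods still unfinished at level L
def cntL (xs : List Int) (L : Int) : Nat := (xs.filter (fun v => L < v)).length

-- seconds consumed to bring every food down by L (capped at each food's own time)
def consumed (xs : List Int) (L : Int) : Int := (xs.map (fun v => min v L)).sum

lemma consumed_plateau (xs : List Int) (L d : Int) (hd : 0 ≤ d)
    (h : ∀ v ∈ xs, L < v → L + d ≤ v) :
    consumed xs (L + d) = consumed xs L + d * (cntL xs L : Int) := by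
  induction xs with
  | nil => simp [consumed, cntL]
  | cons v vs ih =>
    have hv := h v (by simp)
    have ih' := ih (fun w hw => h w (by simp [hw]))
    by_cases hLv : L < v
    · have : min v (L + d) = L + d := min_eq_right (hv hLv)
      simp only [consumed, cntL, List.map_cons, List.sum_cons, List.filter_cons] at *
      simp [hLv, this, ih', min_eq_right (le_of_lt hLv)]
      ring
    · have hvL : v ≤ L := le_of_not_gt hLv
      simp only [consumed, cntL, List.map_cons, List.sum_cons, List.filter_cons] at *
      have h2 : min v (L + d) = v := min_eq_left (by omega)
      simp [hLv, min_eq_left hvL, h2, ih']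
      ring

lemma consumed_eq_sum_of_cnt_zero (xs : List Int) (L : Int) (h : cntL xs L = 0) :
    consumed xs L = xs.sum := by
  induction xs with
  | nil => simp [consumed]
  | cons v vs ih =>
    simp only [cntL, List.filter_cons] at h
    by_cases hLv : L < v
    · simp [hLv] at h
    · rw [if_neg (by simpa using hLv)] at h
      simp only [consumed, List.map_cons, List.sum_cons] at *
      rw [min_eq_left (le_of_not_gt hLv), ih h]

lemma consumed_strict_mono (xs : List Int) (L1 L2 : Int) (h : L1 < L2) :
    consumed xs L1 + (cntL xs L1 : Int) ≤ consumed xs L2 := by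
  induction xs with
  | nil => simp [consumed, cntL]
  | cons v vs ih =>
    simp only [consumed, cntL, List.map_cons, List.sum_cons, List.filter_cons] at *
    by_cases hLv : L1 < v
    · have : min v L1 + 1 ≤ min v L2 := by
        rcases le_total v L2 with hc | hc
        · rw [min_eq_left hc]; omega
        · rw [min_eq_right hc]; omega
      simp [hLv]
      omega

    · have : min v L1 ≤ min v L2 := by
        rcases le_total v L2 with hc | hc
        · rw [min_eq_left hc]; omega
        · rw [min_eq_right hc]; omega
      simp [hLv]
      omega

lemma valid_unique (xs : List Int) (k L1 L2 : Int)
    (h1 : 0 ≤ k - consumed xs L1) (h1' : k - consumed xs L1 < (cntL xs L1 : Int))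
    (h2 : 0 ≤ k - consumed xs L2) (h2' : k - consumed xs L2 < (cntL xs L2 : Int)) :
    L1 = L2 := by
  rcases lt_trichotomy L1 L2 with hc | hc | hc
  · have := consumed_strict_mono xs L1 L2 hc; omega
  · exact hc
  · have := consumed_strict_mono xs L2 L1 hc; omega

lemma passA_spec (orig : List Int) (L d : Int)
    (hv : ∀ v ∈ orig, 0 ≤ v) (hd : 0 ≤ d)
    (hpl : ∀ v ∈ orig, L < v → L + d ≤ v) :
    ∀ nm c : Int, 1 ≤ nm →
    ∃ M, passA d (subL L orig) nm c = (subL (L + d) orig, M, c + (cntL orig (L + d) : Int)) ∧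
      1 ≤ M ∧ M ≤ nm ∧ ∀ v ∈ orig, L + d < v → M ≤ v - (L + d) := by
  induction orig with
  | nil => intro nm c hnm; exact ⟨nm, by simp [passA, subL, cntL], hnm, le_refl nm, by simp⟩
  | cons v vs ih =>
    intro nm c hnm
    have hv0 : 0 ≤ v := hv v (by simp)
    have hplv := hpl v (by simp)
    have hhead : (if (if L < v then v - L else 0) ≠ 0 then (if L < v then v - L else 0) - d
        else (if L < v then v - L else 0)) = (if L + d < v then v - (L + d) else 0) := by
      by_cases h1 : L < v
      · have h2 : L + d ≤ v := hplv h1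
        by_cases h3 : L + d < v
        · rw [if_pos h1, if_pos h3, if_pos (by omega)]; ring
        · rw [if_pos h1, if_neg h3]
          have : v = L + d := by omega
          simp [this]
      · rw [if_neg h1, if_neg (show ¬(L + d < v) by omega)]
        simp
    -- the new accumulators after the head step
    set v1 : Int := if L + d < v then v - (L + d) else 0 with hv1
    have hsub : subL L (v :: vs) = (if L < v then v - L else 0) :: subL L vs := by simp [subL]
    have hnm' : 1 ≤ (if v1 ≠ 0 ∧ v1 < nm then v1 else nm) := by
      by_cases h1 : v1 ≠ 0 ∧ v1 < nm
      · rw [if_pos h1]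
        rcases h1 with ⟨h1a, _⟩
        by_cases h3 : L + d < v
        · simp only [hv1, if_pos h3]; omega
        · simp [hv1, h3] at h1a
      · rw [if_neg h1]; exact hnm
    obtain ⟨M, hEq, hM1, hMle, hMall⟩ :=
      ih (fun w hw => hv w (by simp [hw])) (fun w hw => hpl w (by simp [hw]))
        (if v1 ≠ 0 ∧ v1 < nm then v1 else nm)
        (if v1 ≠ 0 then c + 1 else c) hnm'
    refine ⟨M, ?_, hM1, ?_, ?_⟩
    · rw [hsub]
      show ((if (if L < v then v - L else 0) ≠ 0 then (if L < v then v - L else 0) - d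
          else (if L < v then v - L else 0)) :: _, _, _) = _
      rw [hhead]
      rw [hEq]
      have hcnt : (cntL (v :: vs) (L + d) : Int) = (cntL vs (L + d) : Int) + (if v1 ≠ 0 then 1 else 0) := by
        by_cases h3 : L + d < v
        · have : v1 ≠ 0 := by simp only [hv1, if_pos h3]; omega
          simp [cntL, h3, this]
        · have : v1 = 0 := by simp [hv1, h3]
          simp [cntL, h3, this]
      simp only [subL, List.map_cons, hv1, Prod.mk.injEq]
      refine ⟨trivial, trivial, ?_⟩
      rw [show (cntL (v :: vs) (L + d) : Int) = (cntL vs (L + d) : Int) + (if v1 ≠ 0 then 1 else 0) from hcnt]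
      by_cases h4 : v1 = 0 <;> simp [h4] <;> omega
    · calc M ≤ _ := hMle
        _ ≤ nm := by by_cases h1 : v1 ≠ 0 ∧ v1 < nm
                     · rw [if_pos h1]; exact le_of_lt h1.2
                     · rw [if_neg h1]
    · intro w hw hlw
      rcases List.mem_cons.mp hw with rfl | hw'
      · have hv1w : v1 = w - (L + d) := by rw [hv1, if_pos hlw]
        have hv1ne : v1 ≠ 0 := by rw [hv1w]; omega
        by_cases hlt : v1 < nm
        · have hx := hMle; rw [if_pos ⟨hv1ne, hlt⟩] at hx; omega
        · have hx := hMle; rw [if_neg (fun hc => hlt hc.2)] at hx; omega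
      · exact hMall w hw' hlw

lemma loopA_spec (orig : List Int) (k : Int)
    (hv : ∀ v ∈ orig, 0 ≤ v) (hsum : k < orig.sum) :
    ∀ fuel (L d kc : Int), 0 ≤ L → 0 ≤ d → (∀ v ∈ orig, L < v → L + d ≤ v) →
      kc = k - consumed orig (L + d) → 0 ≤ kc → kc.toNat + 2 ≤ fuel →
      ∃ L', loopA fuel (subL L orig) kc d = (subL L' orig, k - consumed orig L') ∧
        0 ≤ L' ∧ 0 ≤ k - consumed orig L' ∧ k - consumed orig L' < (cntL orig L' : Int) := by
  intro fuel
  induction fuel with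
  | zero => intro L d kc _ _ _ _ _ hf; omega
  | succ fuel ih =>
    intro L d kc hL hd hpl hkc hkc0 hf
    obtain ⟨M, hEq, hM1, hMle, hMall⟩ :=
      passA_spec orig L d hv hd hpl 1000000000 0 (by norm_num)
    rw [zero_add] at hEq
    have hL0' : 0 ≤ L + d := by omega
    simp only [loopA, hEq]
    by_cases hbr : kc < ((cntL orig (L + d) : Int))
    · rw [if_pos hbr]
      exact ⟨L + d, by rw [hkc], hL0', by omega, by omega⟩
    · have hcnt1 : 1 ≤ (cntL orig (L + d) : Int) := by
        by_contra hc0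
        have h0 : cntL orig (L + d) = 0 := by omega
        have := consumed_eq_sum_of_cnt_zero orig (L + d) h0
        omega
      have hcpos : (0 : Int) < (cntL orig (L + d) : Int) := by omega
      rw [if_neg hbr]
      by_cases hpart : kc < M * ((cntL orig (L + d) : Int))
      · -- partial step: now_min = kc // cnt
        rw [if_pos hpart]
        have hq0 : 0 ≤ PySem.Int.floordiv kc ((cntL orig (L + d) : Int)) := by
          rw [PySem.Int.floordiv_eq_ediv_of_pos hcpos]
          exact Int.ediv_nonneg hkc0 (by omega)
        have hqM : PySem.Int.floordiv kc ((cntL orig (L + d) : Int)) < M := by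
          rw [PySem.Int.floordiv_lt_iff_lt_mul hcpos]
          exact hpart
        have key := PySem.Int.floordiv_mul_add_mod kc ((cntL orig (L + d) : Int))
        have hmod0 := PySem.Int.mod_nonneg kc hcpos
        have hmodlt := PySem.Int.mod_lt kc hcpos
        have hkeq : kc - PySem.Int.floordiv kc ((cntL orig (L + d) : Int)) * ((cntL orig (L + d) : Int))
            = PySem.Int.mod kc ((cntL orig (L + d) : Int)) := by linarith [key]
        rw [hkeq]
        have hpl' : ∀ v ∈ orig, (L + d) < v →
            (L + d) + PySem.Int.floordiv kc ((cntL orig (L + d) : Int)) ≤ v := by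
          intro v hvmem hlt
          have := hMall v hvmem hlt
          omega
        have hcons' : PySem.Int.mod kc ((cntL orig (L + d) : Int))
            = k - consumed orig ((L + d) + PySem.Int.floordiv kc ((cntL orig (L + d) : Int))) := by
          rw [consumed_plateau orig (L + d) _ hq0 hpl']
          linarith [hkc, key]
        exact ih (L + d) _ _ hL0' hq0 hpl' hcons' hmod0 (by omega)
      · -- full step: now_min = next_min
        rw [if_neg hpart]
        have hge : ¬ kc < M * ((cntL orig (L + d) : Int)) := hpart
        have hMc1 : 1 ≤ M * ((cntL orig (L + d) : Int)) := by nlinarith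
        have hpl' : ∀ v ∈ orig, (L + d) < v → (L + d) + M ≤ v := by
          intro v hvmem hlt
          have := hMall v hvmem hlt
          omega
        have hcons' : kc - M * ((cntL orig (L + d) : Int))
            = k - consumed orig ((L + d) + M) := by
          rw [consumed_plateau orig (L + d) M (by omega) hpl']
          linarith [hkc]
        have hk0' : 0 ≤ kc - M * ((cntL orig (L + d) : Int)) := by linarith
        have hfuel' : (kc - M * ((cntL orig (L + d) : Int))).toNat + 2 ≤ fuel := by
          have h1 : kc - M * ((cntL orig (L + d) : Int)) ≤ kc - 1 := by linarith
          omega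
        exact ih (L + d) M _ hL0' (by omega) hpl' hcons' hk0' hfuel'

-- pointer invariant for B's walk over the sorted list: positions before j are finished at level L,
-- positions from j on are still unfinished
def InvB (s : List Int) (j : Nat) (L : Int) : Prop :=
  j ≤ s.length ∧ (∀ i, (h : i < s.length) → i < j → s[i] ≤ L) ∧
    (∀ i, (h : i < s.length) → j ≤ i → L < s[i])

lemma getD_eq (s : List Int) (j : Nat) (h : j < s.length) : s.getD j 0 = s[j] :=
  List.getD_eq_getElem s 0 h

lemma cnt_of_InvB (s : List Int) (j : Nat) (L : Int) (h : InvB s j L) :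
    cntL s L = s.length - j := by
  obtain ⟨hj, hlo, hhi⟩ := h
  have : cntL s L = s.countP (fun v => decide (L < v)) := by
    simp [cntL, List.countP_eq_length_filter]
  rw [this]
  rw [← List.take_append_drop j s, List.countP_append]
  have h1 : (s.take j).countP (fun v => decide (L < v)) = 0 := by
    rw [List.countP_eq_zero]
    intro x hx
    obtain ⟨i, hi, hieq⟩ := List.mem_take_iff_getElem.mp hx
    simp only [decide_eq_true_eq]
    have := hlo i (by omega) (by omega)
    omega
  have h2 : (s.drop j).countP (fun v => decide (L < v)) = (s.drop j).length := by
    rw [List.countP_eq_length]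
    intro x hx
    obtain ⟨i, hi, hieq⟩ := List.getElem_of_mem hx
    rw [List.getElem_drop] at hieq
    simp only [decide_eq_true_eq]
    rw [← hieq]
    exact hhi (j + i) (by simp at hi; omega) (by omega)
  rw [h1, h2]
  simp

lemma sorted_mono (s : List Int) (hs : s.Pairwise (· ≤ ·)) (i i' : Nat)
    (hii : i ≤ i') (h' : i' < s.length) : s[i]'(by omega) ≤ s[i'] := by
  rcases Nat.eq_or_lt_of_le hii with rfl | hlt
  · exact le_refl _
  · exact (List.pairwise_iff_getElem.mp hs) i i' (by omega) h' hlt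

lemma skipLe_spec (s : List Int) (hs : s.Pairwise (· ≤ ·)) (j : Nat)
    (hj : j ≤ s.length) (hpre : ∀ i, (h : i < s.length) → i < j → s[i] ≤ 0) :
    InvB s (skipLe s j) 0 := by
  rw [skipLe]
  by_cases h : j < s.length
  · rw [dif_pos h]
    by_cases h2 : s.getD j 0 ≤ 0
    · rw [if_pos h2]
      refine skipLe_spec s hs (j + 1) (by omega) ?_
      intro i hi hij
      rcases Nat.lt_succ_iff_lt_or_eq.mp hij with hij' | rfl
      · exact hpre i hi hij'
      · rw [getD_eq s i h] at h2; exact h2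
    · rw [if_neg h2]
      rw [getD_eq s j h] at h2
      refine ⟨by omega, hpre, ?_⟩
      intro i hi hij
      have := sorted_mono s hs j i hij hi
      omega
  · rw [dif_neg h]
    refine ⟨hj, hpre, ?_⟩
    intro i hi hij
    omega
termination_by s.length - j
decreasing_by omega

lemma skipEq_spec (s : List Int) (hs : s.Pairwise (· ≤ ·)) (lv : Int) (j : Nat)
    (hj : j ≤ s.length) (hpre : ∀ i, (h : i < s.length) → i < j → s[i] ≤ lv)
    (hlb : ∀ i, (h : i < s.length) → j ≤ i → lv ≤ s[i]) :
    InvB s (skipEq s lv j) lv := by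
  rw [skipEq]
  by_cases h : j < s.length
  · rw [dif_pos h]
    by_cases h2 : s.getD j 0 = lv
    · rw [if_pos h2]
      refine skipEq_spec s hs lv (j + 1) (by omega) ?_ ?_
      · intro i hi hij
        rcases Nat.lt_succ_iff_lt_or_eq.mp hij with hij' | rfl
        · exact hpre i hi hij'
        · rw [getD_eq s i h] at h2; omega
      · intro i hi hij
        exact hlb i hi (by omega)
    · rw [if_neg h2]
      rw [getD_eq s j h] at h2
      have hjlb := hlb j h (le_refl j)
      refine ⟨by omega, hpre, ?_⟩
      intro i hi hij
      have := sorted_mono s hs j i hij hi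
      omega
  · rw [dif_neg h]
    refine ⟨hj, hpre, ?_⟩
    intro i hi hij
    omega
termination_by s.length - j
decreasing_by omega

lemma skipEq_ge (s : List Int) (lv : Int) (j : Nat) : j ≤ skipEq s lv j := by
  rw [skipEq]
  by_cases h : j < s.length
  · rw [dif_pos h]
    by_cases h2 : s.getD j 0 = lv
    · rw [if_pos h2]
      have := skipEq_ge s lv (j + 1)
      omega
    · rw [if_neg h2]
  · rw [dif_neg h]
termination_by s.length - j
decreasing_by omega

lemma plateau_of_InvB (s : List Int) (j : Nat) (L d : Int) (hinv : InvB s j L)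
    (hs : s.Pairwise (· ≤ ·)) (hj : j < s.length) (hd : L + d ≤ s[j]) :
    ∀ v ∈ s, L < v → L + d ≤ v := by
  intro v hv hLv
  obtain ⟨i, hi, rfl⟩ := List.getElem_of_mem hv
  rcases Nat.lt_or_ge i j with hij | hij
  · have := hinv.2.1 i hi hij; omega
  · have := sorted_mono s hs j i hij hi
    omega

lemma loopB_spec (s : List Int) (k : Int) (hs : s.Pairwise (· ≤ ·)) (hsum : k < s.sum) :
    ∀ fuel (j : Nat) (L kc : Int), InvB s j L → kc = k - consumed s L → 0 ≤ kc →
      (s.length - j) + 2 ≤ fuel →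
      ∃ L', loopB fuel s j L kc = (L', k - consumed s L') ∧
        0 ≤ k - consumed s L' ∧ k - consumed s L' < (cntL s L' : Int) := by
  intro fuel
  induction fuel with
  | zero => intro j L kc _ _ _ hf; omega
  | succ fuel ih =>
    intro j L kc hinv hkc hkc0 hf
    have hcnt : cntL s L = s.length - j := cnt_of_InvB s j L hinv
    have hjn : j ≤ s.length := hinv.1
    have hcastc : ((cntL s L : Nat) : Int) = (s.length : Int) - j := by
      rw [hcnt]; omega
    simp only [loopB]
    by_cases hbr : kc ≥ (s.length : Int) - (j : Int)
    · rw [if_pos hbr]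
      have hjlt : j < s.length := by
        by_contra hc
        have hj' : j = s.length := by omega
        have h0 : cntL s L = 0 := by omega
        have := consumed_eq_sum_of_cnt_zero s L h0
        omega
      have hstep : L < s[j] := hinv.2.2 j hjlt (le_refl j)
      rw [getD_eq s j hjlt]
      by_cases hpart : kc < (s[j] - L) * ((s.length : Int) - j)
      · rw [if_pos hpart]
        -- partial step, then the loop breaks on re-entry
        have hcpos : (0 : Int) < (s.length : Int) - j := by
          rcases Nat.lt_or_ge j s.length with h | h
          · omega
          · omega
        have hq0 : 0 ≤ PySem.Int.floordiv kc ((s.length : Int) - j) := by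
          rw [PySem.Int.floordiv_eq_ediv_of_pos hcpos]
          exact Int.ediv_nonneg hkc0 (by omega)
        have hqstep : PySem.Int.floordiv kc ((s.length : Int) - j) < s[j] - L := by
          rw [PySem.Int.floordiv_lt_iff_lt_mul hcpos]
          exact hpart
        have key := PySem.Int.floordiv_mul_add_mod kc ((s.length : Int) - j)
        have hmod0 := PySem.Int.mod_nonneg kc hcpos
        have hmodlt := PySem.Int.mod_lt kc hcpos
        have hkeq : kc - PySem.Int.floordiv kc ((s.length : Int) - j) * ((s.length : Int) - j)
            = PySem.Int.mod kc ((s.length : Int) - j) := by linarith [key]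
        rw [hkeq]
        have hpl' := plateau_of_InvB s j L (PySem.Int.floordiv kc ((s.length : Int) - j)) hinv hs hjlt (by omega)
        have hconsq : consumed s (L + PySem.Int.floordiv kc ((s.length : Int) - j))
            = consumed s L + PySem.Int.floordiv kc ((s.length : Int) - j) * ((s.length : Int) - j) := by
          rw [consumed_plateau s L _ hq0 hpl', hcastc]
        have hinv' : InvB s j (L + PySem.Int.floordiv kc ((s.length : Int) - j)) := by
          refine ⟨hjn, ?_, ?_⟩
          · intro i hi hij
            have := hinv.2.1 i hi hij
            omega
          · intro i hi hij
            have := sorted_mono s hs j i hij hi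
            omega
        have hcnt' : cntL s (L + PySem.Int.floordiv kc ((s.length : Int) - j)) = s.length - j :=
          cnt_of_InvB s j _ hinv'
        -- one more iteration: the while-condition now fails
        match fuel, hf with
        | fuel + 1, _ =>
          simp only [loopB]
          rw [if_neg (by omega)]
          refine ⟨L + PySem.Int.floordiv kc ((s.length : Int) - j), ?_, ?_, ?_⟩
          · rw [hconsq, Prod.mk.injEq]
            exact ⟨rfl, by linarith⟩
          · rw [hconsq]; linarith
          · rw [hconsq, hcnt']
            linarith
      · rw [if_neg hpart]
        have hpl' := plateau_of_InvB s j L (s[j] - L) hinv hs hjlt (by omega)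
        have hconsq : consumed s (s[j]) = consumed s L + (s[j] - L) * ((s.length : Int) - j) := by
          have h1 : L + (s[j] - L) = s[j] := by ring
          have := consumed_plateau s L (s[j] - L) (by omega) hpl'
          rw [h1] at this
          rw [this, hcastc]
        have hinv' : InvB s (skipEq s s[j] (j + 1)) s[j] := by
          refine skipEq_spec s hs s[j] (j + 1) (by omega) ?_ ?_
          · intro i hi hij
            rcases Nat.lt_succ_iff_lt_or_eq.mp hij with hij' | rfl
            · have := hinv.2.1 i hi hij'; omega
            · exact le_refl _
          · intro i hi hij
            exact sorted_mono s hs j i (by omega) hi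
        have hge := skipEq_ge s s[j] (j + 1)
        have hcons' : kc - (s[j] - L) * ((s.length : Int) - j) = k - consumed s (s[j]) := by
          rw [hconsq]; linarith
        exact ih (skipEq s s[j] (j + 1)) s[j] _ hinv' hcons' (by linarith) (by omega)
    · rw [if_neg hbr]
      exact ⟨L, by rw [hkc], by omega, by omega⟩

lemma scans_eq (L : Int) :
    ∀ (orig : List Int) (kc i : Int), 0 ≤ kc → kc < (cntL orig L : Int) →
      scanA (subL L orig) kc i + 1 = scanB orig L kc i := by
  intro orig
  induction orig with
  | nil => intro kc i h1 h2; simp [cntL] at h2; omega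
  | cons v vs ih =>
    intro kc i h1 h2
    by_cases hLv : L < v
    · have hne : (v - L) ≠ 0 := by omega
      simp only [subL, List.map_cons, scanA, scanB, if_pos hLv, hne, if_true, ne_eq,
        not_false_eq_true]
      by_cases hk : kc = 0
      · simp [hk]
      · rw [if_neg hk, if_neg hk]
        have hcnt : cntL (v :: vs) L = cntL vs L + 1 := by simp [cntL, hLv]
        exact ih (kc - 1) (i + 1) (by omega) (by rw [hcnt] at h2; push_cast at h2 ⊢; omega)
    · have hz : (if L < v then v - L else 0) = 0 := by rw [if_neg hLv]
      have hcnt : cntL (v :: vs) L = cntL vs L := by simp [cntL, hLv]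
      simp only [subL, List.map_cons, scanA, scanB, hz, if_neg hLv, ne_eq, not_true_eq_false,
        if_false]
      simpa [subL] using ih kc (i + 1) h1 (by rw [hcnt] at h2; exact h2)

lemma cntL_perm (s t : List Int) (L : Int) (h : s.Perm t) : cntL s L = cntL t L :=
  (h.filter _).length_eq

lemma consumed_perm (s t : List Int) (L : Int) (h : s.Perm t) : consumed s L = consumed t L :=
  (h.map _).sum_eq

lemma subL_zero (xs : List Int) (hv : ∀ v ∈ xs, 0 ≤ v) : subL 0 xs = xs := by
  induction xs with
  | nil => rfl
  | cons v vs ih =>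
    have h0 : 0 ≤ v := hv v (by simp)
    have : (if (0 : Int) < v then v - 0 else 0) = v := by
      by_cases h : (0 : Int) < v
      · rw [if_pos h]; ring
      · rw [if_neg h]; omega
    have htail := ih (fun w hw => hv w (by simp [hw]))
    simp only [subL, List.map_cons, this] at htail ⊢
    rw [htail]

lemma consumed_zero (xs : List Int) (hv : ∀ v ∈ xs, 0 ≤ v) : consumed xs 0 = 0 := by
  induction xs with
  | nil => rfl
  | cons v vs ih =>
    have h0 : 0 ≤ v := hv v (by simp)
    simp only [consumed, List.map_cons, List.sum_cons]
    rw [min_eq_right h0]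
    have := ih (fun w hw => hv w (by simp [hw]))
    simp only [consumed] at this
    omega

-- ===== VERDICT (by name: the statement is the Claim_ definition above) =====
theorem solution_spec : Claim_equal_solution := by
  intro ft k hdom hpre
  unfold Spec_solution solution solution_alt
  by_cases hts : ft.sum ≤ k
  · simp [hts]
  · obtain ⟨hk0, hv⟩ : 0 ≤ k ∧ ∀ v ∈ ft, 0 ≤ v := by
      rcases hpre with h | h
      · exact absurd h hts
      · exact h
    simp only [if_neg hts]
    have hsum : k < ft.sum := by omega
    -- A's loop
    have hA := loopA_spec ft k hv hsum (k.toNat + 2) 0 0 k (le_refl 0) (le_refl 0)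
      (fun v _ _ => by omega)
      (by rw [show (0 : Int) + 0 = 0 by ring, consumed_zero ft hv]; ring) hk0 (by omega)
    rw [subL_zero ft hv] at hA
    obtain ⟨LA, hAeq, hLA0, hA1, hA2⟩ := hA
    -- B's loop
    set s := PySem.List.sorted ft (fun x => x) false with hsdef
    have hperm : s.Perm ft := PySem.List.sorted_perm ft (fun x => x) false
    have hpair : s.Pairwise (· ≤ ·) := by
      simpa using PySem.List.sorted_pairwise ft (fun x => x)
    have hvs : ∀ v ∈ s, 0 ≤ v := fun v hv' => hv v (hperm.mem_iff.mp hv')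
    have hssum : s.sum = ft.sum := hperm.sum_eq
    have hinv0 : InvB s (skipLe s 0) 0 :=
      skipLe_spec s hpair 0 (by omega) (fun i hi hij => by omega)
    have hB := loopB_spec s k hpair (by omega) (s.length + 2) (skipLe s 0) 0 k hinv0
      (by rw [consumed_zero s hvs]; ring) hk0 (by omega)
    obtain ⟨LB, hBeq, hB1, hB2⟩ := hB
    -- the two final levels agree
    have hcB : consumed s LB = consumed ft LB := consumed_perm s ft LB hperm
    have hnB : cntL s LB = cntL ft LB := cntL_perm s ft LB hperm
    have hLL : LA = LB := by
      refine valid_unique ft k LA LB hA1 hA2 ?_ ?_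
      · rw [← hcB]; exact hB1
      · rw [← hcB, ← hnB]; exact hB2
    rw [hAeq, hBeq]
    dsimp only
    have hkcs : k - consumed ft LA = k - consumed s LB := by rw [hcB, hLL]
    rw [hkcs]
    rw [show LB = LA from hLL.symm] at hB1 hB2 hcB hnB ⊢
    rw [← hcB] at hA1 hA2
    exact scans_eq LA ft (k - consumed s LA) 0 hA1 hA2
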